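-- pv_equiv track=rewrite | github.com/sirusdas/gtasks-terminal | gtasks_dashboard/enhanced_data_manager.py | categorize_tag
-- ===== SOURCE A (Python) =====
-- CATEGORIES = {
--     'Team': ['@john', '@alice', '@bob', '@mou', '@john', '@devteam'],
--     'UAT': ['#UAT', '#Testing', '#QA', '#Test', '#Validation'],
--     'Production': ['#Live', '#Hotfix', '#Production', '#Deploy', '#Release'],
--     'Priority': ['#High', '#Critical', '[p1]', '[urgent]', '#P0', '#P1'],
--     'Projects': ['#API', '#Frontend', '#Backend', '#Mobile', '#Web', '#Database'],
--     'Status': ['#InProgress', '#Blocked', '#Done', '#Review', '#Testing'],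
--     'Environment': ['#Dev', '#Staging', '#Prod', '#Development', '#Production'],
--     'Type': ['#Bug', '#Feature', '#Enhancement', '#Refactor', '#Documentation'],
--     'Domain': ['#Work', '#Personal', '#Learning', '#Health', '#Finance']
-- }
--
-- def categorize_tag(tag):
--     """Categorize a tag based on the CATEGORIES mapping"""
--     tag_lower = tag.lower()
--
--     for category, tag_list in CATEGORIES.items():
--         if tag_lower in [t.lower() for t in tag_list]:
--             return category
--
--     # Default categorization based on tag format
--     if tag.startswith('@'):
--         return 'Team'
--     elif tag.startswith('#'):
--         return 'Tags'
--     else: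
--         return 'Legacy'
-- ===== SOURCE B (Python) =====
-- # Precomputed reverse index: lowercased tag -> category (first category wins
-- # for tags listed under several categories, matching CATEGORIES' order).
-- TAG_TO_CATEGORY = {
--     '@john': 'Team', '@alice': 'Team', '@bob': 'Team', '@mou': 'Team',
--     '@devteam': 'Team',
--     '#uat': 'UAT', '#testing': 'UAT', '#qa': 'UAT', '#test': 'UAT',
--     '#validation': 'UAT',
--     '#live': 'Production', '#hotfix': 'Production', '#production': 'Production',
--     '#deploy': 'Production', '#release': 'Production',
--     '#high': 'Priority', '#critical': 'Priority', '[p1]': 'Priority',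
--     '[urgent]': 'Priority', '#p0': 'Priority', '#p1': 'Priority',
--     '#api': 'Projects', '#frontend': 'Projects', '#backend': 'Projects',
--     '#mobile': 'Projects', '#web': 'Projects', '#database': 'Projects',
--     '#inprogress': 'Status', '#blocked': 'Status', '#done': 'Status',
--     '#review': 'Status',
--     '#dev': 'Environment', '#staging': 'Environment', '#prod': 'Environment',
--     '#development': 'Environment',
--     '#bug': 'Type', '#feature': 'Type', '#enhancement': 'Type',
--     '#refactor': 'Type', '#documentation': 'Type',
--     '#work': 'Domain', '#personal': 'Domain', '#learning': 'Domain',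
--     '#health': 'Domain', '#finance': 'Domain',
-- }
--
-- PREFIX_FALLBACK = {'@': 'Team', '#': 'Tags'}
--
--
-- def categorize_tag(tag):
--     """Categorize a tag based on the precomputed reverse index."""
--     category = TAG_TO_CATEGORY.get(tag.lower())
--     if category is not None:
--         return category
--     return PREFIX_FALLBACK.get(tag[:1], 'Legacy')
-- ===== Notes on version B (the rewrite author's own statement) =====
-- stated objective: alternative
-- what changed: Replaces the per-call nested scan over CATEGORIES (lowercasing every tag list on every call) with a precomputed literal reverse index dict (lowercased tag -> first category, duplicates resolved in CATEGORIES order) plus a prefix-to-category table keyed on tag[:1], so each call is two O(1) lookups.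
import Mathlib
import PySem

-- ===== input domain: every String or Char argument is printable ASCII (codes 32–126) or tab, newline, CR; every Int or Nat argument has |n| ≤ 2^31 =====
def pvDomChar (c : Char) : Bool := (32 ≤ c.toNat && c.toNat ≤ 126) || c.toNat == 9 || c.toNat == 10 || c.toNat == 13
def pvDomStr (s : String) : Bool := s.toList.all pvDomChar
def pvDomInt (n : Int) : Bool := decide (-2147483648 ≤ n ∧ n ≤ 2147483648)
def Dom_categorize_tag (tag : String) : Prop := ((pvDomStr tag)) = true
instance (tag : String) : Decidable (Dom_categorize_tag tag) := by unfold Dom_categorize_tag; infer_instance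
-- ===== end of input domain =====

-- B replaces A's per-call nested scan of CATEGORIES with a hand-precomputed literal reverse index
-- (lowercased tag -> first category) plus a prefix-to-category table; same return value, one lookup per call.

-- ===== PORT A =====
def CATEGORIES : List (String × List String) := [
  ("Team", ["@john", "@alice", "@bob", "@mou", "@john", "@devteam"]),
  ("UAT", ["#UAT", "#Testing", "#QA", "#Test", "#Validation"]),
  ("Production", ["#Live", "#Hotfix", "#Production", "#Deploy", "#Release"]),
  ("Priority", ["#High", "#Critical", "[p1]", "[urgent]", "#P0", "#P1"]),
  ("Projects", ["#API", "#Frontend", "#Backend", "#Mobile", "#Web", "#Database"]),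
  ("Status", ["#InProgress", "#Blocked", "#Done", "#Review", "#Testing"]),
  ("Environment", ["#Dev", "#Staging", "#Prod", "#Development", "#Production"]),
  ("Type", ["#Bug", "#Feature", "#Enhancement", "#Refactor", "#Documentation"]),
  ("Domain", ["#Work", "#Personal", "#Learning", "#Health", "#Finance"])]

-- the 'for category, tag_list in CATEGORIES.items(): if tag_lower in [...]: return category' loop
def pvCatScan (tl : String) : List (String × List String) → Option String
  | [] => none
  | (category, tag_list) :: rest =>
      if tl ∈ tag_list.map PySem.Str.lower then some category else pvCatScan tl rest

def categorize_tag (tag : String) : String :=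
  let tag_lower := PySem.Str.lower tag
  match pvCatScan tag_lower CATEGORIES with
  | some category => category
  | none =>
      if PySem.Str.startswith tag "@" then "Team"
      else if PySem.Str.startswith tag "#" then "Tags"
      else "Legacy"

-- ===== PORT B =====
-- Source B's literal dict TAG_TO_CATEGORY (unique keys, insertion order)
def TAG_TO_CATEGORY : PySem.Dict String String := PySem.Dict.mk [("@john", "Team"), ("@alice", "Team"), ("@bob", "Team"), ("@mou", "Team"), ("@devteam", "Team"), ("#uat", "UAT"), ("#testing", "UAT"), ("#qa", "UAT"), ("#test", "UAT"), ("#validation", "UAT"), ("#live", "Production"), ("#hotfix", "Production"), ("#production", "Production"), ("#deploy", "Production"), ("#release", "Production"), ("#high", "Priority"), ("#critical", "Priority"), ("[p1]", "Priority"), ("[urgent]", "Priority"), ("#p0", "Priority"), ("#p1", "Priority"), ("#api", "Projects"), ("#frontend", "Projects"), ("#backend", "Projects"), ("#mobile", "Projects"), ("#web", "Projects"), ("#database", "Projects"), ("#inprogress", "Status"), ("#blocked", "Status"), ("#done", "Status"), ("#review", "Status"), ("#dev", "Environment"), ("#staging", "Environment"), ("#prod", "Environment"), ("#development", "Environment"),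 ("#bug", "Type"), ("#feature", "Type"), ("#enhancement", "Type"), ("#refactor", "Type"), ("#documentation", "Type"), ("#work", "Domain"), ("#personal", "Domain"), ("#learning", "Domain"), ("#health", "Domain"), ("#finance", "Domain")]

def PREFIX_FALLBACK : PySem.Dict String String := PySem.Dict.mk [("@", "Team"), ("#", "Tags")]

def categorize_tag_alt (tag : String) : String :=
  match TAG_TO_CATEGORY.get? (PySem.Str.lower tag) with
  | some category => category
  | none => PREFIX_FALLBACK.getD (PySem.Str.slice tag none (some 1)) "Legacy"

-- ===== PRECONDITION & SPEC =====
def Spec_categorize_tag (tag : String) (out : String) : Prop := out = categorize_tag_alt tag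
instance (tag : String) (out : String) : Decidable (Spec_categorize_tag tag out) := by unfold Spec_categorize_tag; infer_instance

-- ===== CLAIM (what is proved, stated in full; the proofs are below) =====
def Claim_equal_categorize_tag : Prop := ∀ (tag : String), Dom_categorize_tag tag → Spec_categorize_tag tag (categorize_tag tag)

-- ===== LEMMAS AND PROOFS =====

-- first-match lookup in a segment whose values are all the same category
theorem pv_lookup_const (f : String → String) (c k : String) : ∀ (ts : List String),
    (ts.map (fun t => (f t, c))).lookup k = if k ∈ ts.map f then some c else none
  | [] => by simp
  | t :: ts => by
    by_cases h : k = f t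
    · simp [h]
    · have hb : (k == f t) = false := by simp [h]
      simp [List.lookup, hb, h, pv_lookup_const f c k ts]

-- A's scan is first-match lookup in the flattened (lowered tag, category) list
theorem pv_scan_flat (k : String) : ∀ (L : List (String × List String)),
    pvCatScan k L = (L.flatMap (fun p => p.2.map (fun t => (PySem.Str.lower t, p.1)))).lookup k
  | [] => by simp [pvCatScan]
  | (c, ts) :: L => by
    rw [pvCatScan, List.flatMap_cons, List.lookup_append, pv_lookup_const, pv_scan_flat k L]
    by_cases h : k ∈ ts.map PySem.Str.lower <;> simp [h]

-- a literal Dict's get? is first-match lookup on its items list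
theorem pv_mk_lookup (k : String) : ∀ (l : List (String × String)),
    (PySem.Dict.mk l).get? k = l.lookup k
  | [] => by simp [PySem.Dict.get?]
  | (a, v) :: l => by
    rw [PySem.Dict.get?_mk_cons, pv_mk_lookup k l]
    by_cases h : k = a
    · simp [List.lookup, h]
    · have hb1 : (a == k) = false := by simp only [beq_eq_false_iff_ne]; exact fun e => h e.symm
      have hb2 : (k == a) = false := by simp [h]
      simp [List.lookup, hb1, hb2]

-- dropping shadowed duplicate keys preserves first-match lookup
def pvDedup : List (String × String) → List String → List (String × String)
  | [], _ => []
  | (a, v) :: l, seen => if a ∈ seen then pvDedup l seen else (a, v) :: pvDedup l (a :: seen)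

theorem pv_dedup_lookup (k : String) : ∀ (l : List (String × String)) (seen : List String),
    k ∉ seen → (pvDedup l seen).lookup k = l.lookup k
  | [], _, _ => by simp [pvDedup]
  | (a, v) :: l, seen, hk => by
    rw [pvDedup]
    by_cases ha : a ∈ seen
    · have hka : (k == a) = false := by
        simp only [beq_eq_false_iff_ne]; exact fun e => hk (e ▸ ha)
      simp [ha, List.lookup, hka, pv_dedup_lookup k l seen hk]
    · by_cases hka : k = a
      · simp [ha, List.lookup, hka]
      · have hmem : k ∉ a :: seen := by simp [hka, hk]
        have hb : (k == a) = false := by simp [hka]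
        simp [ha, List.lookup, hb, pv_dedup_lookup k l (a :: seen) hmem]

-- Source B's literal dict is exactly the deduplication of A's flattened table
theorem pv_items_eq : TAG_TO_CATEGORY.items
    = pvDedup (CATEGORIES.flatMap (fun p => p.2.map (fun t => (PySem.Str.lower t, p.1)))) [] := by
  decide

theorem pv_lookup_eq (k : String) : TAG_TO_CATEGORY.get? k = pvCatScan k CATEGORIES := by
  rw [pv_scan_flat, pv_mk_lookup k TAG_TO_CATEGORY.items, pv_items_eq,
    pv_dedup_lookup k _ [] (by simp)]

-- a singleton prefix: tag[:1] == [c] iff tag starts with c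
theorem pv_take1 (c : Char) (l : List Char) :
    ([c] = l.take 1) = (PySem.Chars.startswith l [c] = true) := by
  cases l with
  | nil => simp [PySem.Chars.startswith]
  | cons c' l => simp [PySem.Chars.startswith, List.isPrefixOf]

-- the prefix table on tag[:1] is A's startswith chain
theorem pv_prefix (c : Char) (tag : String) :
    (String.ofList [c] == PySem.Str.slice tag none (some 1)) = PySem.Str.startswith tag (String.ofList [c]) := by
  have hs : (PySem.Str.slice tag none (some 1)).toList = tag.toList.take 1 := by
    simp [PySem.Str.slice, PySem.Chars.slice, PySem.List.slice_to]
  rw [Bool.eq_iff_iff, beq_iff_eq, ← String.toList_inj, hs]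
  rw [show (String.ofList [c]).toList = [c] from by simp, pv_take1]
  simp

theorem pv_fallback (tag : String) :
    PREFIX_FALLBACK.getD (PySem.Str.slice tag none (some 1)) "Legacy"
      = if PySem.Str.startswith tag "@" then "Team"
        else if PySem.Str.startswith tag "#" then "Tags"
        else "Legacy" := by
  rw [PREFIX_FALLBACK, PySem.Dict.getD]
  rw [show ("@" : String) = String.ofList ['@'] from by decide, show ("#" : String) = String.ofList ['#'] from by decide]
  simp only [PySem.Dict.get?_mk_cons, pv_prefix]
  split_ifs <;> rfl

-- ===== VERDICT (by name: the statement is the Claim_ definition above) =====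
theorem categorize_tag_spec : Claim_equal_categorize_tag := by
  intro tag _
  unfold Spec_categorize_tag categorize_tag categorize_tag_alt
  rw [pv_lookup_eq, pv_fallback]
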